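-- pv_equiv track=rewrite | github.com/squaresLab/entropy-apr-replication | analysis_notebooks/rq1_fl.py | get_bug_rank
-- ===== SOURCE A (Python) =====
-- def get_bug_rank(line_data, ls):
--     rank = 1
--     bug_rank = 99
--     for tup in ls:
--         line = tup[0]
--         is_bug = line_data[line][0]
--         if is_bug:
--             bug_rank = rank
--         rank += 1
--     return bug_rank
-- ===== SOURCE B (Python) =====
-- def get_bug_rank(line_data, ls):
--     for i in range(len(ls) - 1, -1, -1):
--         if line_data[ls[i][0]][0]:
--             return i + 1
--     return 99
-- ===== Notes on version B (the rewrite author's own statement) =====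
-- stated objective: idiomatic
-- what changed: B replaces A's full forward scan that keeps overwriting a last-bug rank with an early-exit backward index scan that returns i+1 at the first buggy line from the end (maintains no rank/bug_rank state).
import Mathlib
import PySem

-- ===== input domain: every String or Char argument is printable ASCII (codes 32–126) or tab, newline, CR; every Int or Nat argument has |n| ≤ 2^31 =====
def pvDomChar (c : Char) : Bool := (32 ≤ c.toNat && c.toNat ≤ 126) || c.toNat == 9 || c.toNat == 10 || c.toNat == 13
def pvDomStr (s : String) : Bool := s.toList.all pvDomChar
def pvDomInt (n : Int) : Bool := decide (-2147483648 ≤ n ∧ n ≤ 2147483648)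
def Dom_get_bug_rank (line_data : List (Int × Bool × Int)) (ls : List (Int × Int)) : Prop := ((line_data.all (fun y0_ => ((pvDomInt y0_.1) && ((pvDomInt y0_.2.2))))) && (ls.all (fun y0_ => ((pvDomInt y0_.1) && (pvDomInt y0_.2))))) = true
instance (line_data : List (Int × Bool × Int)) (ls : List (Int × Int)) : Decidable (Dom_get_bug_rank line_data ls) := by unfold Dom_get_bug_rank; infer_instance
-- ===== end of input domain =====

-- B replaces A's full forward scan (overwriting a last-bug rank) by an early-exit backward
-- index scan returning i+1 at the first buggy line from the end; same cost class, no state kept.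

-- ===== PORT A =====
-- line_data is a Python dict line -> (is_bug, _); line_data[line][0] is a dict lookup, exact under Pre_
def get_bug_rank (line_data : List (Int × Bool × Int)) (ls : List (Int × Int)) : Int :=
  (ls.foldl (fun (st : Int × Int) tup =>
      let line := tup.1
      let is_bug := ((PySem.Dict.mk line_data).getD line (false, 0)).1
      (st.1 + 1, if is_bug then st.1 else st.2)) (1, 99)).2

-- ===== PORT B =====
-- backward index scan: argument n+1 means "check index n next"; stops at the first bug from the end
def get_bug_rank_altAux (line_data : List (Int × Bool × Int)) (ls : List (Int × Int)) : Nat → Int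
  | 0 => 99
  | n + 1 =>
      if ((PySem.Dict.mk line_data).getD (PySem.List.pyGetD ls (n : Int) (0, 0)).1 (false, 0)).1
      then (n : Int) + 1
      else get_bug_rank_altAux line_data ls n

def get_bug_rank_alt (line_data : List (Int × Bool × Int)) (ls : List (Int × Int)) : Int :=
  get_bug_rank_altAux line_data ls ls.length

-- ===== PRECONDITION & SPEC =====
-- Pre_ excludes exactly the inputs where Python A raises KeyError: some tup[0] in ls missing from line_data's keys.
def Pre_get_bug_rank (line_data : List (Int × Bool × Int)) (ls : List (Int × Int)) : Prop :=
  ∀ tup ∈ ls, (PySem.Dict.mk line_data).contains tup.1 = true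
instance (line_data : List (Int × Bool × Int)) (ls : List (Int × Int)) : Decidable (Pre_get_bug_rank line_data ls) := by unfold Pre_get_bug_rank; infer_instance

def pvWitness_get_bug_rank : (List (Int × Bool × Int)) × (List (Int × Int)) :=
  ([(0, true, 2), (1, false, 3)], [(0, 0), (1, 1), (0, 2)])

def Spec_get_bug_rank (line_data : List (Int × Bool × Int)) (ls : List (Int × Int)) (out : Int) : Prop := out = get_bug_rank_alt line_data ls
instance (line_data : List (Int × Bool × Int)) (ls : List (Int × Int)) (out : Int) : Decidable (Spec_get_bug_rank line_data ls out) := by unfold Spec_get_bug_rank; infer_instance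

-- ===== CLAIM (what is proved, stated in full; the proofs are below) =====
def Claim_equal_get_bug_rank : Prop := ∀ (line_data : List (Int × Bool × Int)) (ls : List (Int × Int)), Dom_get_bug_rank line_data ls → Pre_get_bug_rank line_data ls → Spec_get_bug_rank line_data ls (get_bug_rank line_data ls)

-- ===== LEMMAS AND PROOFS =====

-- rank component of A's fold: after processing l starting at rank r, rank = r + |l|
theorem fold_rank (line_data : List (Int × Bool × Int)) (l : List (Int × Int)) (r b : Int) :
    (l.foldl (fun (st : Int × Int) tup =>
      let line := tup.1
      let is_bug := ((PySem.Dict.mk line_data).getD line (false, 0)).1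
      (st.1 + 1, if is_bug then st.1 else st.2)) (r, b)).1 = r + l.length := by
  induction l generalizing r b with
  | nil => simp
  | cons t l ih => rw [List.foldl_cons]; rw [ih]; simp only [List.length_cons]; push_cast; ring

-- B's aux over l ++ [t] agrees with aux over l below index |l|
theorem aux_append (line_data : List (Int × Bool × Int)) (l : List (Int × Int)) (t : Int × Int)
    (n : Nat) (hn : n ≤ l.length) :
    get_bug_rank_altAux line_data (l ++ [t]) n = get_bug_rank_altAux line_data l n := by
  induction n with
  | zero => rfl
  | succ k ih =>
      have hk : k < l.length := by omega
      have hget : PySem.List.pyGetD (l ++ [t]) (k : Int) (0, 0)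
          = PySem.List.pyGetD l (k : Int) (0, 0) := by
        simp [PySem.List.pyGetD_natCast, List.getD, List.getElem?_append_left hk]
      simp only [get_bug_rank_altAux, hget, ih (by omega)]

theorem main_eq (line_data : List (Int × Bool × Int)) (ls : List (Int × Int)) :
    get_bug_rank line_data ls = get_bug_rank_alt line_data ls := by
  induction ls using List.reverseRecOn with
  | nil => rfl
  | append_singleton l t ih =>
      unfold get_bug_rank get_bug_rank_alt at *
      rw [List.foldl_append]
      simp only [List.foldl_cons, List.foldl_nil, List.length_append, List.length_cons,
        List.length_nil, Nat.zero_add]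
      rw [show l.length + 1 = (l.length + 1 : Nat) from rfl]
      simp only [get_bug_rank_altAux]
      have hget : PySem.List.pyGetD (l ++ [t]) ((l.length : Nat) : Int) (0, 0) = t := by
        simp [PySem.List.pyGetD_natCast, List.getD]
      rw [hget, aux_append line_data l t l.length le_rfl]
      rw [fold_rank]
      by_cases hb : ((PySem.Dict.mk line_data).getD t.1 (false, 0)).1 = true
      · simp [hb]; ring
      · simp only [Bool.not_eq_true] at hb
        simp only [hb, Bool.false_eq_true, if_false]
        simpa using ih

-- ===== VERDICT (by name: the statement is the Claim_ definition above) =====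
theorem get_bug_rank_spec : Claim_equal_get_bug_rank := by
  intro line_data ls _ _
  unfold Spec_get_bug_rank
  exact main_eq line_data ls
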